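-- pv_equiv track=rewrite | github.com/mihaiandrei1294/NowDeepN | src/NowDeepN/network_models.py | choose_from_possible_models
-- ===== SOURCE A (Python) =====
-- def choose_from_possible_models(full_name, possible_models):
-- 	if full_name in possible_models:
-- 		return full_name
-- 	else:
-- 		possible_models = sorted(possible_models, key=lambda name: len(name), reverse = True)
-- 		for name in possible_models:
-- 			if name in full_name:
-- 				return name
-- 	raise NotImplementedError("Requested model named " + full_name + " does not exist! Or The model name was not added in possible_models list.")
-- ===== SOURCE B (Python) =====
-- def choose_from_possible_models(full_name, possible_models):
--     if full_name in possible_models: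
--         return full_name
--     best = None
--     for name in possible_models:
--         if (best is None or len(best) < len(name)) and name in full_name:
--             best = name
--     if best is None:
--         raise NotImplementedError("Requested model named " + full_name + " does not exist! Or The model name was not added in possible_models list.")
--     return best
-- ===== Notes on version B (the rewrite author's own statement) =====
-- stated objective: faster
-- what changed: Replaces 'sort all candidates by length descending then scan for the first substring match' with a single pass that keeps the first longest substring match, running the substring test only on candidates strictly longer than the current best.
import Mathlib
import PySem

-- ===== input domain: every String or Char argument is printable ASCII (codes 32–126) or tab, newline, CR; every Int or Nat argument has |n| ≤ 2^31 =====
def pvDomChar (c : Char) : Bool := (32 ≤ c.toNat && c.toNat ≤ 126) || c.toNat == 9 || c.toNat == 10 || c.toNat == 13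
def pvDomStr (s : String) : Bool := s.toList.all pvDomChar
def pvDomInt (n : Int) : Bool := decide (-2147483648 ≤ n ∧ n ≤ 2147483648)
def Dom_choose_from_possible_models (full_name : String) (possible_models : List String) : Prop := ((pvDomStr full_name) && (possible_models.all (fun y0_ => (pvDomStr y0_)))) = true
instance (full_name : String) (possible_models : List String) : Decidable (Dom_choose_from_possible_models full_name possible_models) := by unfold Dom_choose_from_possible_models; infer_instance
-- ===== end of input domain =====

-- B removes A's length-descending sort: one pass over the candidates in original order
-- keeps the first longest substring match, testing 'name in full_name' only when the
-- candidate is strictly longer than the current best (objective: faster, measured).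
-- On inputs where no candidate matches, both Pythons raise NotImplementedError; those
-- inputs are outside Pre_ and the ports return "" there.

-- ===== PORT A =====
-- the for-loop 'for name in …: if name in full_name: return name' as structural recursion
def chooseLoopA (full_name : String) : List String → Option String
  | [] => none
  | name :: rest =>
    if PySem.Str.isIn name full_name then some name else chooseLoopA full_name rest

def choose_from_possible_models (full_name : String) (possible_models : List String) : String :=
  if possible_models.contains full_name then full_name
  else
    let sorted_models := PySem.List.sorted possible_models (fun name => PySem.Str.len name) true
    match chooseLoopA full_name sorted_models with
    | some name => name
    | none => ""   -- Python raises NotImplementedError here; excluded by Pre_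

-- ===== PORT B =====
-- one step of B's loop: 'if (best is None or len(best) < len(name)) and name in full_name: best = name'
def bestStep (full_name : String) (best : Option String) (name : String) : Option String :=
  if (match best with
      | none => true
      | some b => decide (PySem.Str.len b < PySem.Str.len name)) && PySem.Str.isIn name full_name
  then some name else best

def choose_from_possible_models_alt (full_name : String) (possible_models : List String) : String :=
  if possible_models.contains full_name then full_name
  else
    match possible_models.foldl (bestStep full_name) none with
    | some best => best
    | none => ""   -- Python raises NotImplementedError here; excluded by Pre_

-- ===== PRECONDITION & SPEC =====
-- Pre_ excludes exactly the inputs on which both Pythons raise NotImplementedError: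
-- full_name is not itself a candidate and no candidate is a substring of full_name.
def Pre_choose_from_possible_models (full_name : String) (possible_models : List String) : Prop :=
  possible_models.contains full_name = true ∨
    ∃ name ∈ possible_models, PySem.Str.isIn name full_name = true
instance (full_name : String) (possible_models : List String) : Decidable (Pre_choose_from_possible_models full_name possible_models) := by unfold Pre_choose_from_possible_models; infer_instance

def pvWitness_choose_from_possible_models : String × List String := ("resnet50", ["vgg", "resnet"])

def Spec_choose_from_possible_models (full_name : String) (possible_models : List String) (out : String) : Prop := out = choose_from_possible_models_alt full_name possible_models
instance (full_name : String) (possible_models : List String) (out : String) : Decidable (Spec_choose_from_possible_models full_name possible_models out) := by unfold Spec_choose_from_possible_models; infer_instance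

-- ===== CLAIM (what is proved, stated in full; the proofs are below) =====
def Claim_equal_choose_from_possible_models : Prop := ∀ (full_name : String) (possible_models : List String), Dom_choose_from_possible_models full_name possible_models → Pre_choose_from_possible_models full_name possible_models → Spec_choose_from_possible_models full_name possible_models (choose_from_possible_models full_name possible_models)

-- ===== LEMMAS AND PROOFS =====

theorem chooseLoopA_eq_find? (full_name : String) (xs : List String) :
    chooseLoopA full_name xs = xs.find? (fun name => PySem.Str.isIn name full_name) := by
  induction xs with
  | nil => rfl
  | cons y ys ih => simp [chooseLoopA, List.find?, ih]; split <;> simp_all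

-- max? over a one-element extension is one fold step
theorem max?_append_singleton {α κ : Type} [LT κ] [DecidableLT κ]
    (ys : List α) (x : α) (key : α → κ) :
    PySem.List.max? (ys ++ [x]) key =
      match PySem.List.max? ys key with
      | none => some x
      | some m => if key m < key x then some x else some m := by
  unfold PySem.List.max?
  rw [List.foldl_append]
  rfl

-- inserting x into a length-descending list: the first match of the result is
-- x exactly when x matches and beats the old first match strictly
theorem find?_insertBy_desc {α κ : Type} [LinearOrder κ]
    (p : α → Bool) (key : α → κ) (x : α) (S : List α)
    (hS : S.Pairwise (fun a b => key b ≤ key a)) :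
    (PySem.List.insertBy (fun a b => decide (key b < key a)) x S).find? p =
      match S.find? p with
      | none => if p x then some x else none
      | some m => if p x ∧ key m < key x then some x else some m := by
  induction S with
  | nil =>
    cases h : p x <;> simp [PySem.List.insertBy, List.find?, h]
  | cons y ys ih =>
    have hhead : ∀ z ∈ ys, key z ≤ key y := (List.pairwise_cons.mp hS).1
    have htail : ys.Pairwise (fun a b => key b ≤ key a) := (List.pairwise_cons.mp hS).2
    by_cases hlt : key y < key x
    · -- x goes in front
      simp only [PySem.List.insertBy]
      rw [if_pos (by simpa using hlt)]
      cases hx : p x with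
      | true =>
        cases hy : p y with
        | true => simp [List.find?, hx, hy, hlt]
        | false =>
          simp only [List.find?, hx, hy]
          cases hfind : ys.find? p with
          | none => simp
          | some m =>
            have hm : m ∈ ys := List.mem_of_find?_eq_some hfind
            have : key m < key x := lt_of_le_of_lt (hhead m hm) hlt
            simp [this]
      | false =>
        cases hy : p y with
        | true => simp [List.find?, hx, hy]
        | false =>
          simp only [List.find?, hx, hy]
          cases hfind : ys.find? p <;> simp
    · -- x goes after y
      simp only [PySem.List.insertBy]
      rw [if_neg (by simpa using hlt)]
      cases hy : p y with
      | true => simp [List.find?, hy, hlt]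
      | false =>
        simp only [List.find?, hy]
        exact ih htail

-- the main bridge: first substring match of the descending sort
-- = first longest element of the original-order filter
theorem find?_sorted_rev_eq_max?_filter {α κ : Type} [LinearOrder κ]
    (p : α → Bool) (key : α → κ) (xs : List α) :
    (PySem.List.sorted xs key true).find? p =
      PySem.List.max? (xs.filter p) key := by
  induction xs using List.reverseRecOn with
  | nil => rfl
  | append_singleton xs x ih =>
    have hsorted : PySem.List.sorted (xs ++ [x]) key true =
        PySem.List.insertBy (fun a b => decide (key b < key a)) x
          (PySem.List.sorted xs key true) := by
      rw [PySem.List.sorted_rev_eq_foldl_insertBy, PySem.List.sorted_rev_eq_foldl_insertBy,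
        List.foldl_append]
      rfl
    have hdesc : (PySem.List.sorted xs key true).Pairwise (fun a b => key b ≤ key a) :=
      PySem.List.sorted_pairwise_rev xs key
    rw [hsorted, find?_insertBy_desc p key x _ hdesc, ih, List.filter_append]
    cases hx : p x with
    | false =>
      simp only [List.filter, hx, List.append_nil]
      cases hmax : PySem.List.max? (xs.filter p) key <;> simp
    | true =>
      simp only [List.filter, hx]
      rw [max?_append_singleton]
      cases hmax : PySem.List.max? (xs.filter p) key with
      | none => simp
      | some m =>
        by_cases hlt : key m < key x <;> simp [hlt]

-- B's pruned one-pass loop computes the first longest match of the original-order filter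
theorem foldl_bestStep_eq_max?_filter (full_name : String) (xs : List String) :
    xs.foldl (bestStep full_name) none =
      PySem.List.max? (xs.filter (fun name => PySem.Str.isIn name full_name))
        (fun name => PySem.Str.len name) := by
  induction xs using List.reverseRecOn with
  | nil => rfl
  | append_singleton xs x ih =>
    rw [List.foldl_append, List.foldl_cons, List.foldl_nil, ih, List.filter_append]
    cases hx : PySem.Str.isIn x full_name with
    | false =>
      simp only [List.filter, hx, List.append_nil, bestStep, Bool.and_false,
        Bool.false_eq_true, if_false]
    | true =>
      have hx' : PySem.Chars.isIn x.toList full_name.toList = true := by simpa using hx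
      simp only [List.filter, hx]
      rw [max?_append_singleton]
      cases hmax : PySem.List.max?
          (xs.filter (fun name => PySem.Str.isIn name full_name))
          (fun name => PySem.Str.len name) with
      | none => simp [bestStep, hx']
      | some m => simp [bestStep, hx']

-- ===== VERDICT (by name: the statement is the Claim_ definition above) =====
theorem choose_from_possible_models_spec : Claim_equal_choose_from_possible_models := by
  intro full_name possible_models _ hpre
  unfold Spec_choose_from_possible_models
  unfold choose_from_possible_models choose_from_possible_models_alt
  by_cases hc : full_name ∈ possible_models
  · simp [hc]
  · have hc' : possible_models.contains full_name = false := by simpa using hc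
    simp only [hc', Bool.false_eq_true, if_false]
    rw [chooseLoopA_eq_find?, find?_sorted_rev_eq_max?_filter, foldl_bestStep_eq_max?_filter]
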